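-- pv_equiv track=rewrite | github.com/SaicoBys/Python-Studie | challenges/code500/011_count_evens_and_find_max.py | count_evens_and_find_max
-- ===== SOURCE A (Python) =====
-- def count_evens_and_find_max(lst):
--     major = lst[0]
--     counter = 0
--     for num in lst:
--         if num % 2 == 0:
--             counter += 1
--
--         if num > major:
--             major = num
--     return counter, major
-- ===== SOURCE B (Python) =====
-- def count_evens_and_find_max(lst):
--     if len(lst) == 1:
--         n = lst[0]
--         return (1 - (n & 1), n)
--     mid = len(lst) // 2
--     c1, m1 = count_evens_and_find_max(lst[:mid])
--     c2, m2 = count_evens_and_find_max(lst[mid:])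
--     return (c1 + c2, m1 if m1 >= m2 else m2)
-- ===== Notes on version B (the rewrite author's own statement) =====
-- stated objective: alternative
-- what changed: Replaces A's single fused linear loop carrying (counter, major) by a divide-and-conquer recursion that splits the list in half, solves each half and combines the (count, max) pairs, using a bit test (n & 1) for parity at the leaves.
import Mathlib
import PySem

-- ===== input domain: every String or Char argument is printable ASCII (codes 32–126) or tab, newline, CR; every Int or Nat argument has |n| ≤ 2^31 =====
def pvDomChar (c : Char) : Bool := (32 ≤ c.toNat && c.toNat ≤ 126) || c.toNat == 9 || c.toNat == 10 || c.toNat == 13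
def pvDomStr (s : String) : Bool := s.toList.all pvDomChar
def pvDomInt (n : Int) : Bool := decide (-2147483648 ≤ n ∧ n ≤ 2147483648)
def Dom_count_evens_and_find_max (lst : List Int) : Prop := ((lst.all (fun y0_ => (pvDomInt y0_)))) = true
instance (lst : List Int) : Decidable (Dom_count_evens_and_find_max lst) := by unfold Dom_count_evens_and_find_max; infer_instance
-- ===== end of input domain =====

-- B replaces A's single fused linear loop by a divide-and-conquer recursion on list
-- halves, combining (count, max) pairs (objective: alternative; same cost).
-- ===== PORT A =====
def count_evens_and_find_max (lst : List Int) : Int × Int :=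
  match lst with
  | [] => (0, 0)          -- Python: lst[0] raises IndexError here; excluded by Pre_
  | h :: _ =>
    lst.foldl (fun st num =>
      let counter := if PySem.Int.mod num 2 = 0 then st.1 + 1 else st.1
      let major := if num > st.2 then num else st.2
      (counter, major)) (0, h)

-- ===== PORT B =====
-- n & 1 on a Python int is its floor-mod by 2, i.e. PySem.Int.mod n 2 (exact).
-- lst[:mid] / lst[mid:] with 0 ≤ mid ≤ len are take/drop (PySem slice_to/slice_from, exact here).
def count_evens_and_find_max_alt (lst : List Int) : Int × Int :=
  if _h : lst.length = 1 then
    let n := lst.headI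
    (1 - PySem.Int.mod n 2, n)
  else if _h0 : lst.length = 0 then (0, 0)   -- Python: unbounded recursion here; excluded by Pre_
  else
    let mid := lst.length / 2
    let r1 := count_evens_and_find_max_alt (lst.take mid)
    let r2 := count_evens_and_find_max_alt (lst.drop mid)
    (r1.1 + r2.1, if r1.2 ≥ r2.2 then r1.2 else r2.2)
termination_by lst.length
decreasing_by
  · simp only [List.length_take]; omega
  · simp only [List.length_drop]; omega

-- ===== PRECONDITION & SPEC =====
-- Pre_ excludes only the empty list, on which A raises IndexError (and B RecursionError).
def Pre_count_evens_and_find_max (lst : List Int) : Prop := lst ≠ []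
instance (lst : List Int) : Decidable (Pre_count_evens_and_find_max lst) := by unfold Pre_count_evens_and_find_max; infer_instance
def pvWitness_count_evens_and_find_max : List Int := [1, 2, 3]

def Spec_count_evens_and_find_max (lst : List Int) (out : Int × Int) : Prop := out = count_evens_and_find_max_alt lst
instance (lst : List Int) (out : Int × Int) : Decidable (Spec_count_evens_and_find_max lst out) := by unfold Spec_count_evens_and_find_max; infer_instance

-- ===== CLAIM (what is proved, stated in full; the proofs are below) =====
def Claim_equal_count_evens_and_find_max : Prop := ∀ (lst : List Int), Dom_count_evens_and_find_max lst → Pre_count_evens_and_find_max lst → Spec_count_evens_and_find_max lst (count_evens_and_find_max lst)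

-- ===== LEMMAS AND PROOFS =====
-- even-count of a list, as an Int
def pvCnt (l : List Int) : Int := ((l.filter (fun n => PySem.Int.mod n 2 = 0)).length : Int)

-- maximum of a non-empty list
def pvMx (l : List Int) : Int :=
  match l with
  | [] => 0
  | h :: t => t.foldl max h

-- A's fused loop, characterised
theorem fused_loop_eq (t : List Int) : ∀ (c m : Int),
    t.foldl (fun st num =>
      let counter := if PySem.Int.mod num 2 = 0 then st.1 + 1 else st.1
      let major := if num > st.2 then num else st.2
      (counter, major)) (c, m)
    = (c + pvCnt t, t.foldl max m) := by
  induction t with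
  | nil => intro c m; simp [pvCnt]
  | cons x t ih =>
    intro c m
    simp only [List.foldl_cons, pvCnt, List.filter_cons] at *
    rw [ih, show (if x > m then x else m) = max m x from by omega]
    split_ifs <;> simp_all <;> ring

theorem foldl_max_cons (t : List Int) (i h : Int) :
    List.foldl max i (h :: t) = max i (List.foldl max h t) := by
  rw [List.foldl_cons, List.foldl_assoc]

theorem pvMx_append (a b : List Int) (ha : a ≠ []) (hb : b ≠ []) :
    pvMx (a ++ b) = max (pvMx a) (pvMx b) := by
  match a, b with
  | ha' :: ta, hb' :: tb =>
    simp only [pvMx, List.cons_append, List.foldl_append]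
    exact foldl_max_cons tb _ hb'

theorem pvCnt_append (a b : List Int) : pvCnt (a ++ b) = pvCnt a + pvCnt b := by
  simp [pvCnt, List.filter_append]

-- B computes (even-count, maximum) on every non-empty list
theorem alt_eq (lst : List Int) (h : lst ≠ []) :
    count_evens_and_find_max_alt lst = (pvCnt lst, pvMx lst) := by
  induction hn : lst.length using Nat.strong_induction_on generalizing lst with
  | _ n ih =>
    by_cases h1 : lst.length = 1
    · match lst, h1 with
      | [x], _ =>
        rw [count_evens_and_find_max_alt]
        simp only [pvCnt, pvMx, List.filter_cons, List.filter_nil, List.headI,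
          PySem.Int.mod_eq_emod_of_pos (show (0:Int) < 2 by norm_num)]
        rcases Int.emod_two_eq x with hm | hm <;> rw [hm] <;> norm_num
    · have h0 : lst.length ≠ 0 := by simpa using h
      rw [count_evens_and_find_max_alt, dif_neg h1, dif_neg h0]
      have hmid1 : 1 ≤ lst.length / 2 := by omega
      have hmid2 : lst.length / 2 < lst.length := by omega
      have hta : (lst.take (lst.length / 2)) ≠ [] := by
        simp only [← List.length_pos_iff, List.length_take]; omega
      have htb : (lst.drop (lst.length / 2)) ≠ [] := by
        simp only [← List.length_pos_iff, List.length_drop]; omega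
      show ((count_evens_and_find_max_alt (lst.take (lst.length / 2))).1
              + (count_evens_and_find_max_alt (lst.drop (lst.length / 2))).1,
            if (count_evens_and_find_max_alt (lst.take (lst.length / 2))).2
                ≥ (count_evens_and_find_max_alt (lst.drop (lst.length / 2))).2
            then (count_evens_and_find_max_alt (lst.take (lst.length / 2))).2
            else (count_evens_and_find_max_alt (lst.drop (lst.length / 2))).2)
          = (pvCnt lst, pvMx lst)
      rw [ih (lst.take (lst.length / 2)).length
            (by simp only [List.length_take]; omega) _ hta rfl,
          ih (lst.drop (lst.length / 2)).length
            (by simp only [List.length_drop]; omega) _ htb rfl]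
      have hsplit : lst = lst.take (lst.length / 2) ++ lst.drop (lst.length / 2) := by simp
      refine Prod.ext ?_ ?_
      · show pvCnt (lst.take (lst.length / 2)) + pvCnt (lst.drop (lst.length / 2)) = pvCnt lst
        conv_rhs => rw [hsplit, pvCnt_append]
      · show (if pvMx (lst.take (lst.length / 2)) ≥ pvMx (lst.drop (lst.length / 2))
              then pvMx (lst.take (lst.length / 2)) else pvMx (lst.drop (lst.length / 2)))
              = pvMx lst
        rw [show pvMx lst = max (pvMx (lst.take (lst.length / 2))) (pvMx (lst.drop (lst.length / 2))) from by
              conv_lhs => rw [hsplit]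
              exact pvMx_append _ _ hta htb]
        omega

-- ===== VERDICT (by name: the statement is the Claim_ definition above) =====
theorem count_evens_and_find_max_spec : Claim_equal_count_evens_and_find_max := by
  intro lst _ hpre
  unfold Spec_count_evens_and_find_max
  rw [alt_eq lst hpre]
  match lst, hpre with
  | h :: t, _ =>
    rw [show count_evens_and_find_max (h :: t)
          = ((0:Int) + pvCnt (h :: t), List.foldl max h (h :: t)) from fused_loop_eq (h :: t) 0 h]
    simp [pvMx, List.foldl_cons]
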